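-- pv_equiv track=rewrite | github.com/xiaoying-xing/learn2ask | vqa.py | parse_reply
-- ===== SOURCE A (Python) =====
-- def parse_reply(reply):
--     lines = reply.split('\n')
--
--     denotative_questions = []
--     connotative_questions = []
--     # Initialize a flag to determine which list to append to
--     is_denotative = False
--     for line in lines:
--         if "Denotative" in line:
--             is_denotative = True
--             continue
--         elif "Connotative" in line:
--             is_denotative = False
--             continue
--         elif not line.strip():
--             continue
--         question = line.split('?')[0].split('. ', 1)[-1] + '?'
--         question = question.replace('Question:', '').strip()
--         question = question.replace('-','')
--
--         if is_denotative:
--             denotative_questions.append({'question': question, 'score': None})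
--         else:
--             connotative_questions.append({'question': question, 'score': None})
--     return denotative_questions, connotative_questions
-- ===== SOURCE B (Python) =====
-- def parse_reply(reply):
--     lines = reply.split('\n')
--     # Pass 1: partition the lines into labelled segments, each header line
--     # ("Denotative" checked first, then "Connotative") closes the current
--     # segment and opens a new one with its label; the leading segment is
--     # connotative (False).
--     segments = []
--     label, current = False, []
--     for line in lines:
--         if "Denotative" in line:
--             segments.append((label, current))
--             label, current = True, []
--         elif "Connotative" in line:
--             segments.append((label, current))
--             label, current = False, []
--         else:
--             current.append(line)
--     segments.append((label, current))
--     # Pass 2: clean every non-blank line of each segment and collect it into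
--     # the list named by the segment's label, preserving line order.
--     denotative_questions = []
--     connotative_questions = []
--     for is_denotative, seg in segments:
--         target = denotative_questions if is_denotative else connotative_questions
--         for line in seg:
--             if not line.strip():
--                 continue
--             question = line.split('?')[0].split('. ', 1)[-1] + '?'
--             question = question.replace('Question:', '').strip()
--             question = question.replace('-', '')
--             target.append({'question': question, 'score': None})
--     return denotative_questions, connotative_questions
-- ===== Notes on version B (the rewrite author's own statement) =====
-- stated objective: alternative
-- what changed: Replaces A's single mutable-flag loop with a two-pass decomposition: first partition the lines into labelled segments at the Denotative/Connotative header lines, then map the identical cleaning expression over each segment into the list named by its label.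
import Mathlib
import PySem

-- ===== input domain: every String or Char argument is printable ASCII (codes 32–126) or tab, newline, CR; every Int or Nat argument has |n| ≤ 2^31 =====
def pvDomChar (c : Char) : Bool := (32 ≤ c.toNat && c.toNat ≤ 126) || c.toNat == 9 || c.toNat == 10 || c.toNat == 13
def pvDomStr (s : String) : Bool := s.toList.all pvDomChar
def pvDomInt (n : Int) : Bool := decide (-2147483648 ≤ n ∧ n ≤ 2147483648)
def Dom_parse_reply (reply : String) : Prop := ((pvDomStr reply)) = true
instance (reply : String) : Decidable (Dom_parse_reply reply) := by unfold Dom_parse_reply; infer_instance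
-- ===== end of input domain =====

-- B is an alternative decomposition (partition into labelled segments, then map each segment);
-- equivalence with A's single mutable-flag pass is proved on all inputs (both are total).

-- Shared line-cleaning helper: the cleaning expression is textually identical in Source A and Source B.
-- question = line.split('?')[0].split('. ', 1)[-1] + '?'; .replace('Question:','').strip(); .replace('-','')
def cleanLine (line : String) : String :=
  let q := (((PySem.Str.split? line "?").getD []).headD "")
  let q := ((PySem.Str.splitMax? q ". " 1).getD []).getLastD "" ++ "?"
  let q := PySem.Str.strip (PySem.Str.replace q "Question:" "")
  PySem.Str.replace q "-" ""

-- {'question': question, 'score': None}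
def mkQ (line : String) : List (String × Option String) :=
  [("question", some (cleanLine line)), ("score", none)]

-- ===== PORT A =====
-- the body of A's for-loop, state = (is_denotative, denotative_questions, connotative_questions)
def stepA (st : Bool × List (List (String × Option String)) × List (List (String × Option String)))
    (line : String) : Bool × List (List (String × Option String)) × List (List (String × Option String)) :=
  if PySem.Str.isIn "Denotative" line then (true, st.2.1, st.2.2)
  else if PySem.Str.isIn "Connotative" line then (false, st.2.1, st.2.2)
  else if PySem.Str.strip line = "" then st
  else if st.1 then (st.1, st.2.1 ++ [mkQ line], st.2.2)
  else (st.1, st.2.1, st.2.2 ++ [mkQ line])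

def parse_reply (reply : String) : (List (List (String × Option String))) × (List (List (String × Option String))) :=
  let lines := (PySem.Str.split? reply "\n").getD []
  let st := lines.foldl stepA (false, [], [])
  (st.2.1, st.2.2)

-- ===== PORT B =====
-- Pass 1 of Source B: partition lines into labelled segments (label, current are the loop state).
def buildSegs : List String → Bool → List String → List (Bool × List String)
  | [], label, current => [(label, current)]
  | l :: ls, label, current =>
    if PySem.Str.isIn "Denotative" l then (label, current) :: buildSegs ls true []
    else if PySem.Str.isIn "Connotative" l then (label, current) :: buildSegs ls false []
    else buildSegs ls label (current ++ [l])

-- Pass 2 of Source B, inner loop body: clean a non-blank line into the list named by the label.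
def innerAdd (label : Bool)
    (dc : List (List (String × Option String)) × List (List (String × Option String)))
    (line : String) : List (List (String × Option String)) × List (List (String × Option String)) :=
  if PySem.Str.strip line = "" then dc
  else if label then (dc.1 ++ [mkQ line], dc.2)
  else (dc.1, dc.2 ++ [mkQ line])

-- Pass 2 of Source B, outer loop body: process one segment.
def emitSeg (dc : List (List (String × Option String)) × List (List (String × Option String)))
    (seg : Bool × List String) : List (List (String × Option String)) × List (List (String × Option String)) :=
  seg.2.foldl (innerAdd seg.1) dc

def parse_reply_alt (reply : String) : (List (List (String × Option String))) × (List (List (String × Option String))) :=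
  let lines := (PySem.Str.split? reply "\n").getD []
  (buildSegs lines false []).foldl emitSeg ([], [])

-- ===== PRECONDITION & SPEC =====
def Spec_parse_reply (reply : String) (out : (List (List (String × Option String))) × (List (List (String × Option String)))) : Prop := out = parse_reply_alt reply
instance (reply : String) (out : (List (List (String × Option String))) × (List (List (String × Option String)))) : Decidable (Spec_parse_reply reply out) := by unfold Spec_parse_reply; infer_instance

-- ===== CLAIM (what is proved, stated in full; the proofs are below) =====
def Claim_equal_parse_reply : Prop := ∀ (reply : String), Dom_parse_reply reply → Spec_parse_reply reply (parse_reply reply)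

-- ===== LEMMAS AND PROOFS =====

-- Processing B's segments built from the remaining lines with the pending segment (label, current)
-- equals running A's flag loop over those lines, from the state that has already absorbed that segment.
theorem buildSegs_foldl (ls : List String) :
    ∀ (label : Bool) (current : List String)
      (dc : List (List (String × Option String)) × List (List (String × Option String))),
    (buildSegs ls label current).foldl emitSeg dc =
      ((ls.foldl stepA (label, (emitSeg dc (label, current)).1, (emitSeg dc (label, current)).2)).2.1,
       (ls.foldl stepA (label, (emitSeg dc (label, current)).1, (emitSeg dc (label, current)).2)).2.2) := by
  induction ls with
  | nil => intro label current dc; simp [buildSegs]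
  | cons l ls ih =>
    intro label current dc
    by_cases hd : PySem.Str.isIn "Denotative" l = true
    · rw [show buildSegs (l :: ls) label current = (label, current) :: buildSegs ls true [] by
        simp only [buildSegs]; rw [if_pos hd]]
      rw [List.foldl_cons, List.foldl_cons, ih true [] (emitSeg dc (label, current)),
        show stepA (label, (emitSeg dc (label, current)).1, (emitSeg dc (label, current)).2) l
          = (true, (emitSeg dc (label, current)).1, (emitSeg dc (label, current)).2) by
            unfold stepA; rw [if_pos hd]]
      simp [emitSeg]
    · by_cases hc : PySem.Str.isIn "Connotative" l = true
      · rw [show buildSegs (l :: ls) label current = (label, current) :: buildSegs ls false [] by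
          simp only [buildSegs]; rw [if_neg hd, if_pos hc]]
        rw [List.foldl_cons, List.foldl_cons, ih false [] (emitSeg dc (label, current)),
          show stepA (label, (emitSeg dc (label, current)).1, (emitSeg dc (label, current)).2) l
            = (false, (emitSeg dc (label, current)).1, (emitSeg dc (label, current)).2) by
              unfold stepA; rw [if_neg hd, if_pos hc]]
        simp [emitSeg]
      · rw [show buildSegs (l :: ls) label current = buildSegs ls label (current ++ [l]) by
          simp only [buildSegs]; rw [if_neg hd, if_neg hc]]
        rw [ih label (current ++ [l]) dc, List.foldl_cons,
          show emitSeg dc (label, current ++ [l]) = innerAdd label (emitSeg dc (label, current)) l by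
            simp [emitSeg, List.foldl_append],
          show stepA (label, (emitSeg dc (label, current)).1, (emitSeg dc (label, current)).2) l
            = (label, (innerAdd label (emitSeg dc (label, current)) l).1,
                      (innerAdd label (emitSeg dc (label, current)) l).2) by
            unfold stepA innerAdd
            rw [if_neg hd, if_neg hc]
            by_cases hb : PySem.Str.strip l = ""
            · simp [hb]
            · by_cases hl : label <;> simp [hb, hl]]

-- ===== VERDICT (by name: the statement is the Claim_ definition above) =====
theorem parse_reply_spec : Claim_equal_parse_reply := by
  intro reply _
  unfold Spec_parse_reply parse_reply parse_reply_alt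
  rw [buildSegs_foldl]
  simp [emitSeg]
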